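-- pv_equiv track=rewrite | github.com/kaluginpeter/Algorithms_and_structures_tasks | Python_Solutions/CodeWars/6kyu/How_many_feelings.py | count_feelings
-- ===== SOURCE A (Python) =====
-- def count_feelings(st, arr):
--     arr = [''.join(sorted(word)) for word in arr]
--     st = ''.join(sorted(st))
--     count: int = 0
--     for feel in arr:
--         equal: bool = True
--         idx: int = 0
--         for char in feel:
--             while idx < len(st) and st[idx] != char:
--                 idx += 1
--             if idx >= len(st):
--                 equal = False
--                 break
--             idx += 1
--         count += equal
--     return f"{count} feeling{'s' if count != 1 else ''}."
-- ===== SOURCE B (Python) =====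
-- def count_feelings(st, arr):
--     cnt = {}
--     for ch in st:
--         cnt[ch] = cnt.get(ch, 0) + 1
--     count = 0
--     for word in arr:
--         w = {}
--         for ch in word:
--             w[ch] = w.get(ch, 0) + 1
--         if all(w[ch] <= cnt.get(ch, 0) for ch in w):
--             count += 1
--     return f"{count} feeling{'s' if count != 1 else ''}."
-- ===== Notes on version B (the rewrite author's own statement) =====
-- stated objective: faster
-- what changed: Replaces A's sort-every-word, sort-st and two-pointer merge scan with frequency tables: build a character-count dict for st once and one per word, and count a word when every character count fits; no sorting and no rescan of st per word.
import Mathlib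
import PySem

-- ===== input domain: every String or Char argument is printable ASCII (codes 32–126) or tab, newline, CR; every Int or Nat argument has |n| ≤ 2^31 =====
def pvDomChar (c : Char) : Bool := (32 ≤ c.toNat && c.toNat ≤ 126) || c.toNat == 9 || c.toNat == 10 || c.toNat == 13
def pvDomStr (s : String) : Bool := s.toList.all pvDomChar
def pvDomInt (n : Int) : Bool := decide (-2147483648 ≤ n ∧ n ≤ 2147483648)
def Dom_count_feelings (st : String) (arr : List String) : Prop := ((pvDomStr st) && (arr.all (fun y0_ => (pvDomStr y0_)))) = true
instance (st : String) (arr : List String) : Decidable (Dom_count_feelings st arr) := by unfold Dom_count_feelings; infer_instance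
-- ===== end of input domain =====

-- B replaces A's sort-everything-then-two-pointer scan by frequency tables built in one pass
-- (a character-count dict for st and for each word, compared pointwise); return value only.

-- ===== PORT A =====
-- 'while idx < len(st) and st[idx] != char: idx += 1'
def pvAWhile (s : List Char) (c : Char) (idx : Nat) : Nat :=
  if h : idx < s.length then
    if s[idx] != c then pvAWhile s c (idx + 1) else idx
  else idx
termination_by s.length - idx

-- 'for char in feel: …' with running index idx into st
def pvAFor (s : List Char) : List Char → Nat → Bool
  | [], _ => true
  | c :: rest, idx =>
    let i := pvAWhile s c idx
    if s.length ≤ i then false else pvAFor s rest (i + 1)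

def count_feelings (st : String) (arr : List String) : String :=
  let arr2 := arr.map (fun word => PySem.List.sorted word.toList (fun x => x) false)
  let s := PySem.List.sorted st.toList (fun x => x) false
  let count : Int := arr2.foldl (fun cnt feel => cnt + (if pvAFor s feel 0 then 1 else 0)) 0
  PySem.Int.toStr count ++ " feeling" ++ (if count ≠ 1 then "s" else "") ++ "."

-- ===== PORT B =====
-- 'for ch in xs: d[ch] = d.get(ch, 0) + 1'
def pvBCount (xs : List Char) : PySem.Dict Char Int :=
  xs.foldl (fun d ch => d.insert ch (d.getD ch 0 + 1)) PySem.Dict.empty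

def count_feelings_alt (st : String) (arr : List String) : String :=
  let cnt := pvBCount st.toList
  let count : Int := arr.foldl (fun acc word =>
    let w := pvBCount word.toList
    if w.keys.all (fun ch => w.getD ch 0 ≤ cnt.getD ch 0) then acc + 1 else acc) 0
  PySem.Int.toStr count ++ " feeling" ++ (if count ≠ 1 then "s" else "") ++ "."

-- ===== PRECONDITION & SPEC =====
def Spec_count_feelings (st : String) (arr : List String) (out : String) : Prop := out = count_feelings_alt st arr
instance (st : String) (arr : List String) (out : String) : Decidable (Spec_count_feelings st arr out) := by unfold Spec_count_feelings; infer_instance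

-- ===== CLAIM (what is proved, stated in full; the proofs are below) =====
def Claim_equal_count_feelings : Prop := ∀ (st : String) (arr : List String), Dom_count_feelings st arr → Spec_count_feelings st arr (count_feelings st arr)

-- ===== LEMMAS AND PROOFS =====

-- the standard one-sided greedy subsequence check, with dropWhile in place of A's index loop
def pvGo : List Char → List Char → Bool
  | _, [] => true
  | t, c :: rest =>
    match t.dropWhile (fun d => d != c) with
    | [] => false
    | _ :: t' => pvGo t' rest

theorem pvAWhile_eq (s : List Char) (c : Char) (idx : Nat) :
    pvAWhile s c idx = idx + ((s.drop idx).takeWhile (fun d => d != c)).length := by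
  fun_induction pvAWhile s c idx with
  | case1 idx h hne ih =>
    rw [List.drop_eq_getElem_cons h] at *
    simp only [List.takeWhile_cons, hne, List.length_cons, if_true] at *
    omega
  | case2 idx h hne =>
    rw [List.drop_eq_getElem_cons h]
    simp only [List.takeWhile_cons] at *
    simp [hne]
  | case3 idx h =>
    have : s.drop idx = [] := List.drop_eq_nil_of_le (by omega)
    simp [this]

theorem pvAFor_eq_go (s : List Char) (feel : List Char) (idx : Nat) :
    pvAFor s feel idx = pvGo (s.drop idx) feel := by
  induction feel generalizing idx with
  | nil => rfl
  | cons c rest ih =>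
    simp only [pvAFor, pvGo, pvAWhile_eq]
    have htw := List.takeWhile_append_dropWhile (p := fun d => d != c) (l := s.drop idx)
    have hlen : (s.drop idx).length = s.length - idx := List.length_drop
    have key : ∀ (u : List Char), u.drop (u.takeWhile (fun d => d != c)).length
        = u.dropWhile (fun d => d != c) := by
      intro u
      rw [List.takeWhile_eq_take_findIdx_not, List.dropWhile_eq_drop_findIdx_not,
        List.length_take, ← List.drop_eq_drop_min]
    have hdropi : s.drop (idx + ((s.drop idx).takeWhile (fun d => d != c)).length)
        = (s.drop idx).dropWhile (fun d => d != c) := by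
      rw [← List.drop_drop]
      exact key (s.drop idx)
    cases hdw : (s.drop idx).dropWhile (fun d => d != c) with
    | nil =>
      have h1 : ((s.drop idx).takeWhile (fun d => d != c)).length = (s.drop idx).length := by
        conv_rhs => rw [← htw, hdw]
        simp
      have hge : s.length ≤ idx + ((s.drop idx).takeWhile (fun d => d != c)).length := by
        rw [h1, hlen]
        have := List.length_drop (i := idx) (l := s)
        by_cases hi : idx ≤ s.length <;> omega
      simp [hge]
    | cons h' t' =>
      have h2 : ((s.drop idx).takeWhile (fun d => d != c)).length + (h' :: t').length
          = (s.drop idx).length := by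
        conv_rhs => rw [← htw, hdw]
        simp [List.length_append]
      have hne : s.drop idx ≠ [] := by
        intro hnil
        rw [hnil] at hdw
        simp at hdw
      have hidx : idx < s.length := by
        by_contra hge
        exact hne (List.drop_eq_nil_of_le (by omega))
      have hlt : idx + ((s.drop idx).takeWhile (fun d => d != c)).length < s.length := by
        simp only [List.length_cons] at h2
        have hlen : (s.drop idx).length = s.length - idx := List.length_drop
        omega
      rw [if_neg (by omega)]
      rw [ih]
      congr 1
      have hstep : s.drop (idx + ((s.drop idx).takeWhile (fun d => d != c)).length + 1)
          = (s.drop (idx + ((s.drop idx).takeWhile (fun d => d != c)).length)).drop 1 :=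
        (List.drop_drop ..).symm
      rw [hstep, hdropi, hdw]
      rfl

theorem pvGo_iff_sublist (t feel : List Char) : pvGo t feel = true ↔ feel.Sublist t := by
  induction t generalizing feel with
  | nil =>
    cases feel with
    | nil => simp [pvGo]
    | cons c rest => simp [pvGo]
  | cons d t2 ih =>
    cases feel with
    | nil => simp [pvGo]
    | cons c rest =>
      by_cases hdc : d = c
      · subst hdc
        have : pvGo (d :: t2) (d :: rest) = pvGo t2 rest := by
          simp [pvGo]
        rw [this, ih, List.cons_sublist_cons]
      · have hb : (d != c) = true := by simp [hdc]
        have : pvGo (d :: t2) (c :: rest) = pvGo t2 (c :: rest) := by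
          simp only [pvGo, List.dropWhile_cons, hb, if_true]
        rw [this, ih]
        constructor
        · intro h
          exact h.cons d
        · intro h
          cases h with
          | cons _ h => exact h
          | cons₂ => exact absurd rfl hdc

theorem pvA_check (stL w : List Char) :
    (pvAFor (PySem.List.sorted stL (fun x => x) false) (PySem.List.sorted w (fun x => x) false) 0
      = true) ↔ ∀ ch, w.count ch ≤ stL.count ch := by
  rw [pvAFor_eq_go, List.drop_zero, pvGo_iff_sublist]
  constructor
  · intro h ch
    have := h.count_le ch
    rwa [(PySem.List.sorted_perm w _ _).count_eq, (PySem.List.sorted_perm stL _ _).count_eq] at this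
  · intro h
    letI : Std.Antisymm (fun a b : Char => a ≤ b) := ⟨fun _ _ h h' => le_antisymm h h'⟩
    refine List.sublist_of_subperm_of_pairwise (r := fun a b => a ≤ b) ?_ ?_ ?_
    · rw [List.subperm_ext_iff]
      intro x _
      rw [(PySem.List.sorted_perm w _ _).count_eq, (PySem.List.sorted_perm stL _ _).count_eq]
      exact h x
    · simpa using PySem.List.sorted_pairwise w (fun x => x)
    · simpa using PySem.List.sorted_pairwise stL (fun x => x)

theorem pvBCount_getD (xs : List Char) (ch : Char) :
    (pvBCount xs).getD ch 0 = (xs.count ch : Int) := by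
  unfold pvBCount
  rw [PySem.Dict.getD_foldl_insert_add_one]
  simp [PySem.Dict.empty, PySem.Dict.getD, PySem.Dict.get?]

theorem pvB_check (stL w : List Char) :
    (((pvBCount w).keys.all (fun ch => (pvBCount w).getD ch 0 ≤ (pvBCount stL).getD ch 0)) = true)
      ↔ ∀ ch, w.count ch ≤ stL.count ch := by
  simp only [List.all_eq_true, decide_eq_true_eq, pvBCount_getD, Nat.cast_le]
  constructor
  · intro h ch
    by_cases hm : ch ∈ w
    · exact h ch (by
        unfold pvBCount
        rw [PySem.Dict.keys_foldl_insert]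
        simpa [PySem.Dict.empty, PySem.Dict.keys, PySem.Set.update,
          ← PySem.Set.ofList_eq_foldl, PySem.Set.mem_ofList] using hm)
    · simp [List.count_eq_zero_of_not_mem hm]
  · intro h ch _
    exact h ch

theorem pvCount_eq (stL : List Char) (arr : List String) (acc : Int) :
    List.foldl (fun cnt feel =>
        cnt + if pvAFor (PySem.List.sorted stL (fun x => x) false) feel 0 = true then 1 else 0) acc
      (arr.map (fun word => PySem.List.sorted word.toList (fun x => x) false))
    = List.foldl (fun a word =>
        if ((pvBCount word.toList).keys.all fun ch =>
            decide ((pvBCount word.toList).getD ch 0 ≤ (pvBCount stL).getD ch 0)) = true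
        then a + 1 else a) acc arr := by
  induction arr generalizing acc with
  | nil => rfl
  | cons word rest ih =>
    simp only [List.map_cons, List.foldl_cons]
    rw [ih]
    congr 1
    by_cases hb : ((pvBCount word.toList).keys.all fun ch =>
        decide ((pvBCount word.toList).getD ch 0 ≤ (pvBCount stL).getD ch 0)) = true
    · have ha := (pvA_check stL word.toList).2 ((pvB_check stL word.toList).1 (by simpa using hb))
      simp [ha, hb]
    · have ha : ¬ (pvAFor (PySem.List.sorted stL (fun x => x) false)
          (PySem.List.sorted word.toList (fun x => x) false) 0 = true) := by
        intro ha
        exact hb (by simpa using (pvB_check stL word.toList).2 ((pvA_check stL word.toList).1 ha))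
      simp [ha, hb]

-- ===== VERDICT (by name: the statement is the Claim_ definition above) =====
theorem count_feelings_spec : Claim_equal_count_feelings := by
  intro st arr _
  unfold Spec_count_feelings count_feelings count_feelings_alt
  simp only []
  rw [pvCount_eq]
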